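-- pv_equiv track=rewrite | github.com/KarenSequera/SCAV---Video-Part- | practice1/api-python/app.py | funcion_serpentine
-- ===== SOURCE A (Python) =====
-- def funcion_serpentine(matriz):
--
--     #Definimos las variables que contienen el numero máximo de filas y columnas
--     M = len(matriz)
--     N = len(matriz[0]) if M > 0 else 0
--
--     #Esta array va a contener los valores de la matriz en el orden de lectura "serpentine"
--     output = []
--
--     #Inicializamos los indices para leer la matriz
--     i, j = 0, 0
--
--     #El numero de la iteración, va a definir el sentido de lectura de la "serpentine"
--     numero_iteracion = 1
--
--     #Hay tantas iteraciones como elementos de la matriz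
--     while len(output) < M * N:
--         #Si estamos en una iteración par, leemos de arriba a abajo. El número de la columna (j) decrece y el de la fila (x) crece
--         if numero_iteracion % 2 == 0:
--             while i < M and j >= 0:
--                 #Añadimos el valor actual al output y modificamos los indices acorde al orden de lectura
--                 output.append(matriz[i][j])
--                 i += 1
--                 j -= 1
--
--                 #Si llegamos a los limites (primera columna o la ultima fila), se cambia el orden de lectura
--                 # y se avanza una posicion hacia abajo (si estamos en la primera columna) o una posicion a la derecha (si estamos)
--                 if i == M or j < 0:
--                     if j < 0 and i < M:
--                         #Se avanza una posición hacía abajo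
--                         #Como ya hemos avanzado una posicion en la i, solo hace falta que la que j sea 0
--                         j = 0
--                     else:
--                         #Se avanza una posición a la derecha
--                         #Como se le ha restado una a la j anteriormente, hay que sumarle 2.
--                         #Tenemos que quitarle lo que se le ha añadido a la i
--                         j += 2
--                         i -= 1
--                     numero_iteracion += 1
--                     break
--
--         else:
--             #Si estamos en una iteración impar, leemos de abajo a arriba. El número de la columna (j) crece y el de la fila (x) decrece.
--             while i >= 0 and j < N:
--                 #Añadimos el valor actual al output y modificamos los indices acorde al orden de lectura
--                 output.append(matriz[i][j])
--                 i -= 1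
--                 j += 1
--
--                 #Si llegamos a los limites (primera fila o la ultima columna), se cambia el orden de lectura
--                 # y se avanza una posicion hacia abajo (si estamos en la última columna) o una posicion a la derecha (si estamos en la primera fila)
--                 if i < 0 or j == N:
--                     if i < 0 and j < N:
--                         #Se avanza una posición hacia abajo,
--                         #Como ya se ha avanzado una posición de la j, solo hay que reiniciar la i a 0
--                         i = 0
--                     else:
--                         #Se abanza una posición a la derecha
--                         #Como se le ha restado una a la i, para avanzar a la derecha hay que sumarle dos.
--                         #Correjimos la cantidad añadida a la j
--                         i += 2
--                         j -= 1
--                     numero_iteracion += 1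
--                     break
--     return output
-- ===== SOURCE B (Python) =====
-- def funcion_serpentine(matriz):
--     # Enumerate anti-diagonals d = i + j; even diagonals are emitted with i
--     # descending, odd diagonals with i ascending.
--     M = len(matriz)
--     N = len(matriz[0]) if M else 0
--     out = []
--     for d in range(M + N - 1):
--         lo = max(0, d - (N - 1))
--         hi = min(M - 1, d)
--         diag = [matriz[i][d - i] for i in range(lo, hi + 1)]
--         if d % 2 == 0:
--             diag.reverse()
--         out.extend(diag)
--     return out
-- ===== Notes on version B (the rewrite author's own statement) =====
-- stated objective: simpler
-- what changed: Replaces A's pointer-walking while loops with turn/boundary detection by a direct enumeration of anti-diagonals: for each d the valid row range is computed in closed form and the diagonal is reversed when d is even.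
import Mathlib
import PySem

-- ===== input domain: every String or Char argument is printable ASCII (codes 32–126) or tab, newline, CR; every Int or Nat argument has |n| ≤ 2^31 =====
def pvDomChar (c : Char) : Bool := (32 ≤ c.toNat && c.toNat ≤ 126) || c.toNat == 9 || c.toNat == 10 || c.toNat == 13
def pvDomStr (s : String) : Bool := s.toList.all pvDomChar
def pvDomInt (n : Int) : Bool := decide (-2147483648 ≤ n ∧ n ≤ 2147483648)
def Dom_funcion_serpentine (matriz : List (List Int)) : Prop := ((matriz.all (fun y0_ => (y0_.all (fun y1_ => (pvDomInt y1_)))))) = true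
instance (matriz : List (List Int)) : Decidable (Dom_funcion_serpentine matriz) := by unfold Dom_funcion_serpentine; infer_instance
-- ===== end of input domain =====

-- B replaces A's pointer-walking serpentine with a per-anti-diagonal enumeration (closed-form row
-- range, parity-based reversal); objective: simpler.

-- matriz[i][j]; exact whenever both indices are nonnegative and in range, which Pre_ guarantees
-- at every access either port performs.
def pvCell (mat : List (List Int)) (i j : Int) : Int :=
  PySem.List.pyGetD (PySem.List.pyGetD mat i []) j 0

-- ===== PORT A =====
-- the inner 'while' of the odd (up-right) iteration; fuel only makes it total
def pvInnerUp (mat : List (List Int)) (N : Int) :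
    Nat → Int → Int → Int → List Int → Int × Int × Int × List Int
  | 0, i, j, iter, out => (i, j, iter, out)
  | fuel+1, i, j, iter, out =>
    if 0 ≤ i ∧ j < N then
      let out' := out ++ [pvCell mat i j]
      let i' := i - 1
      let j' := j + 1
      if i' < 0 ∨ j' = N then
        if i' < 0 ∧ j' < N then (0, j', iter + 1, out')
        else (i' + 2, j' - 1, iter + 1, out')
      else pvInnerUp mat N fuel i' j' iter out'
    else (i, j, iter, out)

-- the inner 'while' of the even (down-left) iteration; fuel only makes it total
def pvInnerDown (mat : List (List Int)) (M : Int) :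
    Nat → Int → Int → Int → List Int → Int × Int × Int × List Int
  | 0, i, j, iter, out => (i, j, iter, out)
  | fuel+1, i, j, iter, out =>
    if i < M ∧ 0 ≤ j then
      let out' := out ++ [pvCell mat i j]
      let i' := i + 1
      let j' := j - 1
      if i' = M ∨ j' < 0 then
        if j' < 0 ∧ i' < M then (i', 0, iter + 1, out')
        else (i' - 1, j' + 2, iter + 1, out')
      else pvInnerDown mat M fuel i' j' iter out'
    else (i, j, iter, out)

-- the outer 'while len(output) < M*N'; fuel only makes it total
def pvOuter (mat : List (List Int)) (M N : Int) (innerFuel : Nat) :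
    Nat → Int → Int → Int → List Int → List Int
  | 0, _, _, _, out => out
  | fuel+1, i, j, iter, out =>
    if (out.length : Int) < M * N then
      if PySem.Int.mod iter 2 = 0 then
        let s := pvInnerDown mat M innerFuel i j iter out
        pvOuter mat M N innerFuel fuel s.1 s.2.1 s.2.2.1 s.2.2.2
      else
        let s := pvInnerUp mat N innerFuel i j iter out
        pvOuter mat M N innerFuel fuel s.1 s.2.1 s.2.2.1 s.2.2.2
    else out

def funcion_serpentine (matriz : List (List Int)) : List Int :=
  let M : Int := matriz.length
  let N : Int := if 0 < matriz.length then ((matriz.headD []).length : Int) else 0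
  pvOuter matriz M N (matriz.length + (matriz.headD []).length + 1)
    (matriz.length + (matriz.headD []).length) 0 0 1 []

-- ===== PORT B =====
def funcion_serpentine_alt (matriz : List (List Int)) : List Int :=
  let M : Int := matriz.length
  let N : Int := if 0 < matriz.length then ((matriz.headD []).length : Int) else 0
  (PySem.List.pyRange 0 (M + N - 1) 1).foldl (fun out d =>
    let lo : Int := max 0 (d - (N - 1))
    let hi : Int := min (M - 1) d
    let diag := (PySem.List.pyRange lo (hi + 1) 1).map (fun i => pvCell matriz i (d - i))
    out ++ (if PySem.Int.mod d 2 = 0 then diag.reverse else diag)) []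

-- ===== PRECONDITION & SPEC =====
-- Pre_ excludes exactly the inputs where some row is shorter than the first row: on those the
-- Python A raises IndexError (every row is read at all columns 0..N-1, N = len(matriz[0])).
def Pre_funcion_serpentine (matriz : List (List Int)) : Prop :=
  ∀ r ∈ matriz, (matriz.headD []).length ≤ r.length
instance (matriz : List (List Int)) : Decidable (Pre_funcion_serpentine matriz) := by
  unfold Pre_funcion_serpentine; infer_instance

def pvWitness_funcion_serpentine : List (List Int) := [[1, 2], [3, 4]]

def Spec_funcion_serpentine (matriz : List (List Int)) (out : List Int) : Prop := out = funcion_serpentine_alt matriz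
instance (matriz : List (List Int)) (out : List Int) : Decidable (Spec_funcion_serpentine matriz out) := by unfold Spec_funcion_serpentine; infer_instance

-- ===== CLAIM (what is proved, stated in full; the proofs are below) =====
def Claim_equal_funcion_serpentine : Prop := ∀ (matriz : List (List Int)), Dom_funcion_serpentine matriz → Pre_funcion_serpentine matriz → Spec_funcion_serpentine matriz (funcion_serpentine matriz)

-- ===== LEMMAS AND PROOFS =====

-- first and last valid row index of anti-diagonal d
def pvLo (N d : Int) : Int := max 0 (d - (N - 1))
def pvHi (M d : Int) : Int := min (M - 1) d

-- diagonal d read top-to-bottom (row index ascending)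
def pvAsc (mat : List (List Int)) (M N d : Int) : List Int :=
  (PySem.List.pyRange (pvLo N d) (pvHi M d + 1) 1).map (fun i => pvCell mat i (d - i))

-- diagonal d in emission order
def pvDiag (mat : List (List Int)) (M N d : Int) : List Int :=
  if PySem.Int.mod d 2 = 0 then (pvAsc mat M N d).reverse else pvAsc mat M N d

-- diagonals d, d+1, …, M+N-2 in emission order
def pvTail (mat : List (List Int)) (M N d : Int) : List Int :=
  (PySem.List.pyRange d (M + N - 1) 1).flatMap (pvDiag mat M N)

lemma pv_up_spec (mat : List (List Int)) (N d : Int) :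
    ∀ (k : Nat) (i iter : Int) (out : List Int) (fuel : Nat),
      i = pvLo N d + k → k < fuel →
      pvInnerUp mat N fuel i (d - i) iter out =
        (pvLo N (d+1), (d+1) - pvLo N (d+1), iter + 1,
         out ++ ((PySem.List.pyRange (pvLo N d) (i+1) 1).map (fun x => pvCell mat x (d - x))).reverse) := by
  intro k
  induction k with
  | zero =>
    intro i iter out fuel hi hf
    obtain ⟨f, rfl⟩ : ∃ f, fuel = f + 1 := ⟨fuel - 1, by omega⟩
    have hlo : i = max 0 (d - (N - 1)) := by simpa [pvLo] using hi
    have h1 : 0 ≤ i ∧ d - i < N := by omega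
    have h2 : i - 1 < 0 ∨ d - i + 1 = N := by omega
    rw [pvInnerUp]
    simp only [if_pos h1, if_pos h2]
    have hr : PySem.List.pyRange (pvLo N d) (i+1) 1 = [i] := by
      rw [hlo]; exact PySem.List.pyRange_one_singleton _
    rw [hr]
    by_cases h3 : i - 1 < 0 ∧ d - i + 1 < N
    · rw [if_pos h3]
      have : pvLo N (d+1) = 0 := by simp only [pvLo]; omega
      simp [this]
      omega
    · rw [if_neg h3]
      have : pvLo N (d+1) = i + 1 := by simp only [pvLo]; omega
      simp [this]
      omega
  | succ k ih =>
    intro i iter out fuel hi hf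
    have hlo : i = max 0 (d - (N - 1)) + (k+1 : Nat) := by simpa [pvLo] using hi
    obtain ⟨f, rfl⟩ : ∃ f, fuel = f + 1 := ⟨fuel - 1, by omega⟩
    have h1 : 0 ≤ i ∧ d - i < N := by omega
    have h2 : ¬ (i - 1 < 0 ∨ d - i + 1 = N) := by omega
    rw [pvInnerUp]
    simp only [if_pos h1, if_neg h2]
    have harg : d - i + 1 = d - (i - 1) := by omega
    rw [harg]
    rw [ih (i-1) iter _ f (by omega) (by omega)]
    have hr : PySem.List.pyRange (pvLo N d) (i+1) 1 = PySem.List.pyRange (pvLo N d) i 1 ++ [i] := by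
      have := PySem.List.pyRange_one_succ_right (a := pvLo N d) (b := i) (by simp only [pvLo]; omega)
      simpa using this
    rw [hr]
    simp

lemma pv_down_spec (mat : List (List Int)) (M d : Int) :
    ∀ (k : Nat) (i iter : Int) (out : List Int) (fuel : Nat),
      i = pvHi M d - k → k < fuel →
      pvInnerDown mat M fuel i (d - i) iter out =
        (pvHi M (d+1), (d+1) - pvHi M (d+1), iter + 1,
         out ++ (PySem.List.pyRange i (pvHi M d + 1) 1).map (fun x => pvCell mat x (d - x))) := by
  intro k
  induction k with
  | zero =>
    intro i iter out fuel hi hf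
    obtain ⟨f, rfl⟩ : ∃ f, fuel = f + 1 := ⟨fuel - 1, by omega⟩
    have hlo : i = min (M - 1) d := by simpa [pvHi] using hi
    have h1 : i < M ∧ 0 ≤ d - i := by omega
    have h2 : i + 1 = M ∨ d - i - 1 < 0 := by omega
    rw [pvInnerDown]
    simp only [if_pos h1, if_pos h2]
    have hr : PySem.List.pyRange i (pvHi M d + 1) 1 = [i] := by
      rw [show pvHi M d = i from hlo.symm ▸ rfl]
      exact PySem.List.pyRange_one_singleton _
    rw [hr]
    by_cases h3 : d - i - 1 < 0 ∧ i + 1 < M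
    · rw [if_pos h3]
      have : pvHi M (d+1) = i + 1 := by simp only [pvHi]; omega
      simp [this]
      omega
    · rw [if_neg h3]
      have : pvHi M (d+1) = i := by simp only [pvHi]; omega
      simp [this]
      omega
  | succ k ih =>
    intro i iter out fuel hi hf
    have hlo : i = min (M - 1) d - (k+1 : Nat) := by simpa [pvHi] using hi
    obtain ⟨f, rfl⟩ : ∃ f, fuel = f + 1 := ⟨fuel - 1, by omega⟩
    have h1 : i < M ∧ 0 ≤ d - i := by omega
    have h2 : ¬ (i + 1 = M ∨ d - i - 1 < 0) := by omega
    rw [pvInnerDown]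
    simp only [if_pos h1, if_neg h2]
    have harg : d - i - 1 = d - (i + 1) := by omega
    rw [harg]
    rw [ih (i+1) iter _ f (by omega) (by omega)]
    have hr : PySem.List.pyRange i (pvHi M d + 1) 1 = i :: PySem.List.pyRange (i+1) (pvHi M d + 1) 1 := by
      exact PySem.List.pyRange_one_cons (by simp only [pvHi]; omega)
    rw [hr]
    simp

lemma pv_tail_split (mat : List (List Int)) (M N d : Int) (h : d < M + N - 1) :
    pvTail mat M N d = pvDiag mat M N d ++ pvTail mat M N (d+1) := by
  unfold pvTail
  rw [PySem.List.pyRange_one_cons h]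
  simp

lemma pv_diag_length (mat : List (List Int)) (M N d : Int) :
    (pvDiag mat M N d).length = (pvHi M d + 1 - pvLo N d).toNat := by
  unfold pvDiag pvAsc
  split <;> simp [PySem.List.length_pyRange_one]

lemma pv_diag_nonempty (mat : List (List Int)) (M N d : Int)
    (hM : 1 ≤ M) (hN : 1 ≤ N) (h0 : 0 ≤ d) (h : d < M + N - 1) :
    1 ≤ (pvDiag mat M N d).length := by
  rw [pv_diag_length]
  simp only [pvLo, pvHi]
  omega

lemma pv_sum_map_range (f : Nat → Nat) (n : Nat) :
    ((List.range n).map f).sum = ∑ i ∈ Finset.range n, f i := by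
  induction n with
  | zero => simp
  | succ n ih => simp [List.range_succ, Finset.sum_range_succ, ih]

lemma pv_count (m n : Nat) (hm : 1 ≤ m) (hn : 1 ≤ n) (g : Nat → Nat)
    (hg : ∀ d, g d = (min m (d+1) - (d+1-n))) :
    ∑ d ∈ Finset.range (m + n - 1), g d = m * n := by
  have step1 : ∀ d ∈ Finset.range (m + n - 1), g d
      = ((Finset.range m).filter (fun i => i ≤ d ∧ d < i + n)).card := by
    intro d _
    have : (Finset.range m).filter (fun i => i ≤ d ∧ d < i + n)
        = Finset.Ico (d + 1 - n) (min m (d + 1)) := by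
      ext i
      simp only [Finset.mem_filter, Finset.mem_range, Finset.mem_Ico]
      omega
    rw [hg, this, Nat.card_Ico]
  rw [Finset.sum_congr rfl step1]
  have step2 : ∀ d ∈ Finset.range (m + n - 1),
      ((Finset.range m).filter (fun i => i ≤ d ∧ d < i + n)).card
        = ∑ i ∈ Finset.range m, (if i ≤ d ∧ d < i + n then 1 else 0) := by
    intro d _; rw [Finset.card_filter]
  rw [Finset.sum_congr rfl step2, Finset.sum_comm]
  have step3 : ∀ i ∈ Finset.range m,
      (∑ d ∈ Finset.range (m + n - 1), (if i ≤ d ∧ d < i + n then 1 else 0)) = n := by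
    intro i hi
    rw [← Finset.card_filter]
    have : (Finset.range (m + n - 1)).filter (fun d => i ≤ d ∧ d < i + n)
        = Finset.Ico i (i + n) := by
      ext d
      simp only [Finset.mem_filter, Finset.mem_range, Finset.mem_Ico]
      simp only [Finset.mem_range] at hi
      omega
    rw [this, Nat.card_Ico]
    omega
  rw [Finset.sum_congr rfl step3]
  simp [Finset.sum_const, Finset.card_range]

lemma pv_tail_length (mat : List (List Int)) (m n : Nat) (hm : 1 ≤ m) (hn : 1 ≤ n) :
    (pvTail mat (m : Int) (n : Int) 0).length = m * n := by
  unfold pvTail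
  rw [List.length_flatMap]
  have hcast : (m : Int) + (n : Int) - 1 = ((m + n - 1 : Nat) : Int) := by omega
  rw [hcast, PySem.List.pyRange_zero_natCast]
  rw [List.map_map]
  rw [pv_sum_map_range]
  apply pv_count m n hm hn
  intro d
  simp only [Function.comp]
  rw [pv_diag_length]
  simp only [pvLo, pvHi]
  omega

lemma pv_outer_spec (mat : List (List Int)) (M N : Int) (innerFuel : Nat)
    (hM : 1 ≤ M) (hN : 1 ≤ N) (hIF : M < (innerFuel : Int)) :
    ∀ (k : Nat) (d : Int) (fuel : Nat) (i j : Int) (out : List Int),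
      d + k = M + N - 1 → 0 ≤ d → k < fuel →
      ((out.length : Int) + ((pvTail mat M N d).length : Int) = M * N) →
      ((i, j) = if (d+1) % 2 = 0 then (pvLo N d, d - pvLo N d) else (pvHi M d, d - pvHi M d)) →
      pvOuter mat M N innerFuel fuel i j (d+1) out = out ++ pvTail mat M N d := by
  intro k
  induction k with
  | zero =>
    intro d fuel i j out hd h0 hf hlen hstate
    obtain ⟨f, rfl⟩ : ∃ f, fuel = f + 1 := ⟨fuel - 1, by omega⟩
    have htail : pvTail mat M N d = [] := by
      unfold pvTail
      rw [PySem.List.pyRange_one_eq_nil (by omega)]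
      simp
    rw [htail] at hlen ⊢
    rw [pvOuter]
    rw [if_neg (by simp at hlen; omega)]
    simp
  | succ k ih =>
    intro d fuel i j out hd h0 hf hlen hstate
    obtain ⟨f, rfl⟩ : ∃ f, fuel = f + 1 := ⟨fuel - 1, by omega⟩
    have hdlt : d < M + N - 1 := by omega
    have hsplit := pv_tail_split mat M N d hdlt
    have hne := pv_diag_nonempty mat M N d hM hN h0 hdlt
    have hcond : (out.length : Int) < M * N := by
      rw [hsplit] at hlen; simp at hlen; omega
    have hmodbr : PySem.Int.mod (d+1) 2 = (d+1) % 2 :=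
      PySem.Int.mod_eq_emod_of_pos (by norm_num)
    have hlohi : pvLo N d ≤ pvHi M d := by simp only [pvLo, pvHi]; omega
    rw [pvOuter, if_pos hcond]
    by_cases hpar : (d+1) % 2 = 0
    · -- even iteration: down-left, d is odd
      rw [if_pos (by rw [hmodbr]; exact hpar)]
      rw [if_pos hpar] at hstate
      have hij : i = pvLo N d ∧ j = d - pvLo N d := by
        constructor <;> [exact congrArg Prod.fst hstate; exact congrArg Prod.snd hstate]
      obtain ⟨rfl, rfl⟩ : i = pvLo N d ∧ j = d - pvLo N d := hij
      have hdown := pv_down_spec mat M d ((pvHi M d - pvLo N d).toNat) (pvLo N d) (d+1) out innerFuel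
        (by omega) (by simp only [pvLo, pvHi] at hlohi ⊢; omega)
      have hdiag : pvDiag mat M N d = pvAsc mat M N d := by
        unfold pvDiag
        rw [if_neg]
        rw [PySem.Int.mod_eq_emod_of_pos (by norm_num)]
        omega
      rw [hdown]
      dsimp only
      have hasc : (PySem.List.pyRange (pvLo N d) (pvHi M d + 1) 1).map (fun x => pvCell mat x (d - x))
          = pvAsc mat M N d := rfl
      rw [hasc]
      have := ih (d+1) f (pvHi M (d+1)) ((d+1) - pvHi M (d+1)) (out ++ pvAsc mat M N d)
        (by omega) (by omega) (by omega)
        (by rw [hsplit, hdiag] at hlen; simp at hlen ⊢; omega)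
        (by rw [if_neg (by omega)])
      rw [this, hsplit, hdiag, List.append_assoc]
    · -- odd iteration: up-right, d is even
      rw [if_neg (by rw [hmodbr]; exact hpar)]
      rw [if_neg hpar] at hstate
      have hij : i = pvHi M d ∧ j = d - pvHi M d := by
        constructor <;> [exact congrArg Prod.fst hstate; exact congrArg Prod.snd hstate]
      obtain ⟨rfl, rfl⟩ : i = pvHi M d ∧ j = d - pvHi M d := hij
      have hup := pv_up_spec mat N d ((pvHi M d - pvLo N d).toNat) (pvHi M d) (d+1) out innerFuel
        (by omega) (by simp only [pvLo, pvHi] at hlohi ⊢; omega)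
      have hdiag : pvDiag mat M N d = (pvAsc mat M N d).reverse := by
        unfold pvDiag
        rw [if_pos]
        rw [PySem.Int.mod_eq_emod_of_pos (by norm_num)]
        omega
      rw [hup]
      dsimp only
      have hasc : ((PySem.List.pyRange (pvLo N d) (pvHi M d + 1) 1).map (fun x => pvCell mat x (d - x))).reverse
          = (pvAsc mat M N d).reverse := rfl
      rw [hasc]
      have := ih (d+1) f (pvLo N (d+1)) ((d+1) - pvLo N (d+1)) (out ++ (pvAsc mat M N d).reverse)
        (by omega) (by omega) (by omega)
        (by rw [hsplit, hdiag] at hlen; simp at hlen ⊢; omega)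
        (by rw [if_pos (by omega)])
      rw [this, hsplit, hdiag, List.append_assoc]

lemma pv_alt_eq_tail (mat : List (List Int)) :
    funcion_serpentine_alt mat
      = pvTail mat (mat.length : Int)
          (if 0 < mat.length then ((mat.headD []).length : Int) else 0) 0 := by
  unfold funcion_serpentine_alt pvTail pvDiag pvAsc pvLo pvHi
  rw [PySem.List.foldl_append_eq_flatMap]
  simp

-- ===== VERDICT (by name: the statement is the Claim_ definition above) =====
theorem funcion_serpentine_spec : Claim_equal_funcion_serpentine := by
  intro mat _ _
  unfold Spec_funcion_serpentine funcion_serpentine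
  rw [pv_alt_eq_tail]
  rcases Nat.eq_zero_or_pos mat.length with hm | hm
  · -- empty matrix
    have h0 : mat = [] := List.length_eq_zero_iff.mp hm
    subst h0
    simp [pvOuter, pvTail, PySem.List.pyRange_one_eq_nil]
  · rw [if_pos hm]
    rcases Nat.eq_zero_or_pos (mat.headD []).length with hn | hn
    · -- first row empty: A exits immediately, every diagonal of B is empty
      rw [hn]
      dsimp only
      obtain ⟨f, hf⟩ : ∃ f, mat.length + 0 = f + 1 := ⟨mat.length - 1, by omega⟩
      rw [hf, pvOuter]
      rw [if_neg (by simp)]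
      symm
      unfold pvTail
      rw [List.flatMap_eq_nil_iff.mpr]
      intro x hx
      have hx0 : 0 ≤ x := ((PySem.List.mem_pyRange_one).mp hx).1
      unfold pvDiag pvAsc
      rw [PySem.List.pyRange_one_eq_nil (by simp only [pvLo, pvHi]; push_cast; omega)]
      split <;> simp
    · -- main case
      have := pv_outer_spec mat (mat.length : Int) ((mat.headD []).length : Int)
        (mat.length + (mat.headD []).length + 1)
        (by omega) (by omega) (by push_cast; omega)
        (mat.length + (mat.headD []).length - 1) 0
        (mat.length + (mat.headD []).length) 0 0 []
        (by omega) (by omega) (by omega)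
        (by
          simp only [List.length_nil, Nat.cast_zero, zero_add]
          rw [pv_tail_length mat mat.length (mat.headD []).length hm hn]
          push_cast; ring)
        (by
          rw [if_neg (by omega)]
          simp only [pvHi]
          rw [show min ((mat.length : Int) - 1) 0 = 0 from by omega]
          norm_num)
      simpa using this
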